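-- pv_equiv track=rewrite | github.com/ramanuja-5194/AI-Fashion-Design-Assistant | models/trend_predictor.py | simple_season_prediction
-- ===== SOURCE A (Python) =====
-- def simple_season_prediction(colors):
--     """Predict season based on dominant colors"""
--     # Color-season mapping
--     spring_colors = ['pink', 'green', 'yellow']
--     summer_colors = ['blue', 'white', 'cyan']
--     fall_colors = ['orange', 'brown', 'red']
--     winter_colors = ['black', 'gray', 'purple']
--
--     season_scores = {
--         'spring': sum(1 for color in colors if color in spring_colors),
--         'summer': sum(1 for color in colors if color in summer_colors),
--         'fall': sum(1 for color in colors if color in fall_colors),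
--         'winter': sum(1 for color in colors if color in winter_colors)
--     }
--
--     return max(season_scores, key=season_scores.get)
-- ===== SOURCE B (Python) =====
-- SEASON_OF = {
--     'pink': 'spring', 'green': 'spring', 'yellow': 'spring',
--     'blue': 'summer', 'white': 'summer', 'cyan': 'summer',
--     'orange': 'fall', 'brown': 'fall', 'red': 'fall',
--     'black': 'winter', 'gray': 'winter', 'purple': 'winter',
-- }
--
-- def simple_season_prediction(colors):
--     """Predict season based on dominant colors"""
--     scores = {'spring': 0, 'summer': 0, 'fall': 0, 'winter': 0}
--     for color in colors:
--         season = SEASON_OF.get(color)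
--         if season is not None:
--             scores[season] += 1
--     return max(scores, key=scores.get)
-- ===== Notes on version B (the rewrite author's own statement) =====
-- stated objective: faster
-- what changed: Replaces A's four separate membership-scan passes over the colors list with a single pass that looks each color up in one color-to-season dict and increments that season's counter; the scores dict is initialized in spring/summer/fall/winter order so max's first-maximum tie-breaking is identical.
import Mathlib
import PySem

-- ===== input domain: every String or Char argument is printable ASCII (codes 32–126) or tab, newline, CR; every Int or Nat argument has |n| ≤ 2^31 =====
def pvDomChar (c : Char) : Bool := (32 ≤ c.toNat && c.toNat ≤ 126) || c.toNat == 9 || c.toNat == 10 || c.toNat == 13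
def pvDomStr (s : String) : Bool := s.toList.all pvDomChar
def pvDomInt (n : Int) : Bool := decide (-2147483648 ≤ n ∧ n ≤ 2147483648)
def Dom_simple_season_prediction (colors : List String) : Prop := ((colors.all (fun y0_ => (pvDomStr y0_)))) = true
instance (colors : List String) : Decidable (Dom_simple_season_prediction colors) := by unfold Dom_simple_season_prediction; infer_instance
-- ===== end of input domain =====

-- B is simpler: one pass over colors with a color→season dict instead of A's four membership-scan passes.

-- shared library helper: Python's max(dict, key=dict.get) — first key with maximal value,
-- over the items in insertion order (both Pythons make this same max call)
def pyMaxKeyByVal (items : List (String × Int)) : String :=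
  match items with
  | [] => ""
  | kv :: rest => (rest.foldl (fun best x => if x.2 > best.2 then x else best) kv).1

-- ===== PORT A =====
def simple_season_prediction (colors : List String) : String :=
  let spring_colors := ["pink", "green", "yellow"]
  let summer_colors := ["blue", "white", "cyan"]
  let fall_colors := ["orange", "brown", "red"]
  let winter_colors := ["black", "gray", "purple"]
  let season_scores : PySem.Dict String Int := PySem.Dict.ofList
    [("spring", colors.foldl (fun acc c => if c ∈ spring_colors then acc + 1 else acc) 0),
     ("summer", colors.foldl (fun acc c => if c ∈ summer_colors then acc + 1 else acc) 0),
     ("fall",   colors.foldl (fun acc c => if c ∈ fall_colors then acc + 1 else acc) 0),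
     ("winter", colors.foldl (fun acc c => if c ∈ winter_colors then acc + 1 else acc) 0)]
  pyMaxKeyByVal season_scores.items

-- ===== PORT B =====
def seasonOf : PySem.Dict String String := PySem.Dict.ofList
  [("pink", "spring"), ("green", "spring"), ("yellow", "spring"),
   ("blue", "summer"), ("white", "summer"), ("cyan", "summer"),
   ("orange", "fall"), ("brown", "fall"), ("red", "fall"),
   ("black", "winter"), ("gray", "winter"), ("purple", "winter")]

def simple_season_prediction_alt (colors : List String) : String :=
  let scores0 : PySem.Dict String Int := PySem.Dict.ofList
    [("spring", 0), ("summer", 0), ("fall", 0), ("winter", 0)]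
  let scores := colors.foldl
    (fun sc color =>
      match seasonOf.get? color with
      | some season => sc.insert season (sc.getD season 0 + 1)
      | none => sc) scores0
  pyMaxKeyByVal scores.items

-- ===== PRECONDITION & SPEC =====
def Spec_simple_season_prediction (colors : List String) (out : String) : Prop := out = simple_season_prediction_alt colors
instance (colors : List String) (out : String) : Decidable (Spec_simple_season_prediction colors out) := by unfold Spec_simple_season_prediction; infer_instance

-- ===== CLAIM (what is proved, stated in full; the proofs are below) =====
def Claim_equal_simple_season_prediction : Prop := ∀ (colors : List String), Dom_simple_season_prediction colors → Spec_simple_season_prediction colors (simple_season_prediction colors)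

-- ===== LEMMAS AND PROOFS =====

-- counting fold with an arbitrary start
lemma foldl_count_shift (p : String → Prop) [DecidablePred p] (cs : List String) (n : Int) :
    cs.foldl (fun acc c => if p c then acc + 1 else acc) n
      = n + cs.foldl (fun acc c => if p c then acc + 1 else acc) 0 := by
  induction cs generalizing n with
  | nil => simp
  | cons x cs ih =>
    simp only [List.foldl_cons]
    rw [ih, ih (if p x then 0 + 1 else 0)]
    split_ifs <;> omega

-- B's single-pass fold, from arbitrary counters, equals the four A-style counts
lemma foldB_eq (cs : List String) (a b c d : Int) :
    cs.foldl
      (fun sc color =>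
        match seasonOf.get? color with
        | some season => sc.insert season (sc.getD season 0 + 1)
        | none => sc)
      (PySem.Dict.mk [("spring", a), ("summer", b), ("fall", c), ("winter", d)])
    = PySem.Dict.mk
      [("spring", a + cs.foldl (fun acc c => if c ∈ ["pink", "green", "yellow"] then acc + 1 else acc) 0),
       ("summer", b + cs.foldl (fun acc c => if c ∈ ["blue", "white", "cyan"] then acc + 1 else acc) 0),
       ("fall",   c + cs.foldl (fun acc c => if c ∈ ["orange", "brown", "red"] then acc + 1 else acc) 0),
       ("winter", d + cs.foldl (fun acc c => if c ∈ ["black", "gray", "purple"] then acc + 1 else acc) 0)] := by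
  induction cs generalizing a b c d with
  | nil => simp
  | cons x cs ih =>
    simp only [List.foldl_cons]
    rw [foldl_count_shift (fun c => c ∈ ["pink", "green", "yellow"]),
        foldl_count_shift (fun c => c ∈ ["blue", "white", "cyan"]),
        foldl_count_shift (fun c => c ∈ ["orange", "brown", "red"]),
        foldl_count_shift (fun c => c ∈ ["black", "gray", "purple"])]
    by_cases h1 : "pink" = x
    · subst h1
      rw [show seasonOf.get? "pink" = some "spring" from rfl]
      dsimp only
      rw [show (PySem.Dict.mk [("spring", a), ("summer", b), ("fall", c), ("winter", d)]).insert "spring"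
            ((PySem.Dict.mk [("spring", a), ("summer", b), ("fall", c), ("winter", d)]).getD "spring" 0 + 1) = PySem.Dict.mk [("spring", a + 1), ("summer", b), ("fall", c), ("winter", d)] from rfl]
      rw [ih, show (if ("pink":String) ∈ ["pink", "green", "yellow"] then (0:Int) + 1 else 0) = 1 from rfl, show (if ("pink":String) ∈ ["blue", "white", "cyan"] then (0:Int) + 1 else 0) = 0 from rfl, show (if ("pink":String) ∈ ["orange", "brown", "red"] then (0:Int) + 1 else 0) = 0 from rfl, show (if ("pink":String) ∈ ["black", "gray", "purple"] then (0:Int) + 1 else 0) = 0 from rfl]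
      simp only [PySem.Dict.mk.injEq, List.cons.injEq, Prod.mk.injEq, and_true, true_and]
      omega
    by_cases h2 : "green" = x
    · subst h2
      rw [show seasonOf.get? "green" = some "spring" from rfl]
      dsimp only
      rw [show (PySem.Dict.mk [("spring", a), ("summer", b), ("fall", c), ("winter", d)]).insert "spring"
            ((PySem.Dict.mk [("spring", a), ("summer", b), ("fall", c), ("winter", d)]).getD "spring" 0 + 1) = PySem.Dict.mk [("spring", a + 1), ("summer", b), ("fall", c), ("winter", d)] from rfl]
      rw [ih, show (if ("green":String) ∈ ["pink", "green", "yellow"] then (0:Int) + 1 else 0) = 1 from rfl, show (if ("green":String) ∈ ["blue", "white", "cyan"] then (0:Int) + 1 else 0) = 0 from rfl, show (if ("green":String) ∈ ["orange", "brown", "red"] then (0:Int) + 1 else 0) = 0 from rfl, show (if ("green":String) ∈ ["black", "gray", "purple"] then (0:Int) + 1 else 0) = 0 from rfl]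
      simp only [PySem.Dict.mk.injEq, List.cons.injEq, Prod.mk.injEq, and_true, true_and]
      omega
    by_cases h3 : "yellow" = x
    · subst h3
      rw [show seasonOf.get? "yellow" = some "spring" from rfl]
      dsimp only
      rw [show (PySem.Dict.mk [("spring", a), ("summer", b), ("fall", c), ("winter", d)]).insert "spring"
            ((PySem.Dict.mk [("spring", a), ("summer", b), ("fall", c), ("winter", d)]).getD "spring" 0 + 1) = PySem.Dict.mk [("spring", a + 1), ("summer", b), ("fall", c), ("winter", d)] from rfl]
      rw [ih, show (if ("yellow":String) ∈ ["pink", "green", "yellow"] then (0:Int) + 1 else 0) = 1 from rfl, show (if ("yellow":String) ∈ ["blue", "white", "cyan"] then (0:Int) + 1 else 0) = 0 from rfl, show (if ("yellow":String) ∈ ["orange", "brown", "red"] then (0:Int) + 1 else 0) = 0 from rfl, show (if ("yellow":String) ∈ ["black", "gray", "purple"] then (0:Int) + 1 else 0) = 0 from rfl]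
      simp only [PySem.Dict.mk.injEq, List.cons.injEq, Prod.mk.injEq, and_true, true_and]
      omega
    by_cases h4 : "blue" = x
    · subst h4
      rw [show seasonOf.get? "blue" = some "summer" from rfl]
      dsimp only
      rw [show (PySem.Dict.mk [("spring", a), ("summer", b), ("fall", c), ("winter", d)]).insert "summer"
            ((PySem.Dict.mk [("spring", a), ("summer", b), ("fall", c), ("winter", d)]).getD "summer" 0 + 1) = PySem.Dict.mk [("spring", a), ("summer", b + 1), ("fall", c), ("winter", d)] from rfl]
      rw [ih, show (if ("blue":String) ∈ ["pink", "green", "yellow"] then (0:Int) + 1 else 0) = 0 from rfl, show (if ("blue":String) ∈ ["blue", "white", "cyan"] then (0:Int) + 1 else 0) = 1 from rfl, show (if ("blue":String) ∈ ["orange", "brown", "red"] then (0:Int) + 1 else 0) = 0 from rfl, show (if ("blue":String) ∈ ["black", "gray", "purple"] then (0:Int) + 1 else 0) = 0 from rfl]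
      simp only [PySem.Dict.mk.injEq, List.cons.injEq, Prod.mk.injEq, and_true, true_and]
      omega
    by_cases h5 : "white" = x
    · subst h5
      rw [show seasonOf.get? "white" = some "summer" from rfl]
      dsimp only
      rw [show (PySem.Dict.mk [("spring", a), ("summer", b), ("fall", c), ("winter", d)]).insert "summer"
            ((PySem.Dict.mk [("spring", a), ("summer", b), ("fall", c), ("winter", d)]).getD "summer" 0 + 1) = PySem.Dict.mk [("spring", a), ("summer", b + 1), ("fall", c), ("winter", d)] from rfl]
      rw [ih, show (if ("white":String) ∈ ["pink", "green", "yellow"] then (0:Int) + 1 else 0) = 0 from rfl, show (if ("white":String) ∈ ["blue", "white", "cyan"] then (0:Int) + 1 else 0) = 1 from rfl, show (if ("white":String) ∈ ["orange", "brown", "red"] then (0:Int) + 1 else 0) = 0 from rfl, show (if ("white":String) ∈ ["black", "gray", "purple"] then (0:Int) + 1 else 0) = 0 from rfl]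
      simp only [PySem.Dict.mk.injEq, List.cons.injEq, Prod.mk.injEq, and_true, true_and]
      omega
    by_cases h6 : "cyan" = x
    · subst h6
      rw [show seasonOf.get? "cyan" = some "summer" from rfl]
      dsimp only
      rw [show (PySem.Dict.mk [("spring", a), ("summer", b), ("fall", c), ("winter", d)]).insert "summer"
            ((PySem.Dict.mk [("spring", a), ("summer", b), ("fall", c), ("winter", d)]).getD "summer" 0 + 1) = PySem.Dict.mk [("spring", a), ("summer", b + 1), ("fall", c), ("winter", d)] from rfl]
      rw [ih, show (if ("cyan":String) ∈ ["pink", "green", "yellow"] then (0:Int) + 1 else 0) = 0 from rfl, show (if ("cyan":String) ∈ ["blue", "white", "cyan"] then (0:Int) + 1 else 0) = 1 from rfl, show (if ("cyan":String) ∈ ["orange", "brown", "red"] then (0:Int) + 1 else 0) = 0 from rfl, show (if ("cyan":String) ∈ ["black", "gray", "purple"] then (0:Int) + 1 else 0) = 0 from rfl]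
      simp only [PySem.Dict.mk.injEq, List.cons.injEq, Prod.mk.injEq, and_true, true_and]
      omega
    by_cases h7 : "orange" = x
    · subst h7
      rw [show seasonOf.get? "orange" = some "fall" from rfl]
      dsimp only
      rw [show (PySem.Dict.mk [("spring", a), ("summer", b), ("fall", c), ("winter", d)]).insert "fall"
            ((PySem.Dict.mk [("spring", a), ("summer", b), ("fall", c), ("winter", d)]).getD "fall" 0 + 1) = PySem.Dict.mk [("spring", a), ("summer", b), ("fall", c + 1), ("winter", d)] from rfl]
      rw [ih, show (if ("orange":String) ∈ ["pink", "green", "yellow"] then (0:Int) + 1 else 0) = 0 from rfl, show (if ("orange":String) ∈ ["blue", "white", "cyan"] then (0:Int) + 1 else 0) = 0 from rfl, show (if ("orange":String) ∈ ["orange", "brown", "red"] then (0:Int) + 1 else 0) = 1 from rfl, show (if ("orange":String) ∈ ["black", "gray", "purple"] then (0:Int) + 1 else 0) = 0 from rfl]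
      simp only [PySem.Dict.mk.injEq, List.cons.injEq, Prod.mk.injEq, and_true, true_and]
      omega
    by_cases h8 : "brown" = x
    · subst h8
      rw [show seasonOf.get? "brown" = some "fall" from rfl]
      dsimp only
      rw [show (PySem.Dict.mk [("spring", a), ("summer", b), ("fall", c), ("winter", d)]).insert "fall"
            ((PySem.Dict.mk [("spring", a), ("summer", b), ("fall", c), ("winter", d)]).getD "fall" 0 + 1) = PySem.Dict.mk [("spring", a), ("summer", b), ("fall", c + 1), ("winter", d)] from rfl]
      rw [ih, show (if ("brown":String) ∈ ["pink", "green", "yellow"] then (0:Int) + 1 else 0) = 0 from rfl, show (if ("brown":String) ∈ ["blue", "white", "cyan"] then (0:Int) + 1 else 0) = 0 from rfl, show (if ("brown":String) ∈ ["orange", "brown", "red"] then (0:Int) + 1 else 0) = 1 from rfl, show (if ("brown":String) ∈ ["black", "gray", "purple"] then (0:Int) + 1 else 0) = 0 from rfl]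
      simp only [PySem.Dict.mk.injEq, List.cons.injEq, Prod.mk.injEq, and_true, true_and]
      omega
    by_cases h9 : "red" = x
    · subst h9
      rw [show seasonOf.get? "red" = some "fall" from rfl]
      dsimp only
      rw [show (PySem.Dict.mk [("spring", a), ("summer", b), ("fall", c), ("winter", d)]).insert "fall"
            ((PySem.Dict.mk [("spring", a), ("summer", b), ("fall", c), ("winter", d)]).getD "fall" 0 + 1) = PySem.Dict.mk [("spring", a), ("summer", b), ("fall", c + 1), ("winter", d)] from rfl]
      rw [ih, show (if ("red":String) ∈ ["pink", "green", "yellow"] then (0:Int) + 1 else 0) = 0 from rfl, show (if ("red":String) ∈ ["blue", "white", "cyan"] then (0:Int) + 1 else 0) = 0 from rfl, show (if ("red":String) ∈ ["orange", "brown", "red"] then (0:Int) + 1 else 0) = 1 from rfl, show (if ("red":String) ∈ ["black", "gray", "purple"] then (0:Int) + 1 else 0) = 0 from rfl]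
      simp only [PySem.Dict.mk.injEq, List.cons.injEq, Prod.mk.injEq, and_true, true_and]
      omega
    by_cases h10 : "black" = x
    · subst h10
      rw [show seasonOf.get? "black" = some "winter" from rfl]
      dsimp only
      rw [show (PySem.Dict.mk [("spring", a), ("summer", b), ("fall", c), ("winter", d)]).insert "winter"
            ((PySem.Dict.mk [("spring", a), ("summer", b), ("fall", c), ("winter", d)]).getD "winter" 0 + 1) = PySem.Dict.mk [("spring", a), ("summer", b), ("fall", c), ("winter", d + 1)] from rfl]
      rw [ih, show (if ("black":String) ∈ ["pink", "green", "yellow"] then (0:Int) + 1 else 0) = 0 from rfl, show (if ("black":String) ∈ ["blue", "white", "cyan"] then (0:Int) + 1 else 0) = 0 from rfl, show (if ("black":String) ∈ ["orange", "brown", "red"] then (0:Int) + 1 else 0) = 0 from rfl, show (if ("black":String) ∈ ["black", "gray", "purple"] then (0:Int) + 1 else 0) = 1 from rfl]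
      simp only [PySem.Dict.mk.injEq, List.cons.injEq, Prod.mk.injEq, and_true, true_and]
      omega
    by_cases h11 : "gray" = x
    · subst h11
      rw [show seasonOf.get? "gray" = some "winter" from rfl]
      dsimp only
      rw [show (PySem.Dict.mk [("spring", a), ("summer", b), ("fall", c), ("winter", d)]).insert "winter"
            ((PySem.Dict.mk [("spring", a), ("summer", b), ("fall", c), ("winter", d)]).getD "winter" 0 + 1) = PySem.Dict.mk [("spring", a), ("summer", b), ("fall", c), ("winter", d + 1)] from rfl]
      rw [ih, show (if ("gray":String) ∈ ["pink", "green", "yellow"] then (0:Int) + 1 else 0) = 0 from rfl, show (if ("gray":String) ∈ ["blue", "white", "cyan"] then (0:Int) + 1 else 0) = 0 from rfl, show (if ("gray":String) ∈ ["orange", "brown", "red"] then (0:Int) + 1 else 0) = 0 from rfl, show (if ("gray":String) ∈ ["black", "gray", "purple"] then (0:Int) + 1 else 0) = 1 from rfl]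
      simp only [PySem.Dict.mk.injEq, List.cons.injEq, Prod.mk.injEq, and_true, true_and]
      omega
    by_cases h12 : "purple" = x
    · subst h12
      rw [show seasonOf.get? "purple" = some "winter" from rfl]
      dsimp only
      rw [show (PySem.Dict.mk [("spring", a), ("summer", b), ("fall", c), ("winter", d)]).insert "winter"
            ((PySem.Dict.mk [("spring", a), ("summer", b), ("fall", c), ("winter", d)]).getD "winter" 0 + 1) = PySem.Dict.mk [("spring", a), ("summer", b), ("fall", c), ("winter", d + 1)] from rfl]
      rw [ih, show (if ("purple":String) ∈ ["pink", "green", "yellow"] then (0:Int) + 1 else 0) = 0 from rfl, show (if ("purple":String) ∈ ["blue", "white", "cyan"] then (0:Int) + 1 else 0) = 0 from rfl, show (if ("purple":String) ∈ ["orange", "brown", "red"] then (0:Int) + 1 else 0) = 0 from rfl, show (if ("purple":String) ∈ ["black", "gray", "purple"] then (0:Int) + 1 else 0) = 1 from rfl]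
      simp only [PySem.Dict.mk.injEq, List.cons.injEq, Prod.mk.injEq, and_true, true_and]
      omega
    rw [show seasonOf.get? x = none by
          have e1 : (("pink":String) == x) = false := beq_eq_false_iff_ne.mpr h1
          have e2 : (("green":String) == x) = false := beq_eq_false_iff_ne.mpr h2
          have e3 : (("yellow":String) == x) = false := beq_eq_false_iff_ne.mpr h3
          have e4 : (("blue":String) == x) = false := beq_eq_false_iff_ne.mpr h4
          have e5 : (("white":String) == x) = false := beq_eq_false_iff_ne.mpr h5
          have e6 : (("cyan":String) == x) = false := beq_eq_false_iff_ne.mpr h6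
          have e7 : (("orange":String) == x) = false := beq_eq_false_iff_ne.mpr h7
          have e8 : (("brown":String) == x) = false := beq_eq_false_iff_ne.mpr h8
          have e9 : (("red":String) == x) = false := beq_eq_false_iff_ne.mpr h9
          have e10 : (("black":String) == x) = false := beq_eq_false_iff_ne.mpr h10
          have e11 : (("gray":String) == x) = false := beq_eq_false_iff_ne.mpr h11
          have e12 : (("purple":String) == x) = false := beq_eq_false_iff_ne.mpr h12
          rw [show seasonOf = PySem.Dict.mk [("pink", "spring"), ("green", "spring"), ("yellow", "spring"), ("blue", "summer"), ("white", "summer"), ("cyan", "summer"), ("orange", "fall"), ("brown", "fall"), ("red", "fall"), ("black", "winter"), ("gray", "winter"), ("purple", "winter")] from rfl]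
          simp only [PySem.Dict.get?, List.find?, e1, e2, e3, e4, e5, e6,
                     e7, e8, e9, e10, e11, e12, Option.map_none]]
    dsimp only
    rw [ih]
    simp only [List.mem_cons, List.not_mem_nil, or_false]
    simp only [Ne.symm h1, Ne.symm h2, Ne.symm h3, Ne.symm h4, Ne.symm h5, Ne.symm h6,
               Ne.symm h7, Ne.symm h8, Ne.symm h9, Ne.symm h10, Ne.symm h11, Ne.symm h12,
               if_neg, or_self, ite_false, if_false]
    simp only [PySem.Dict.mk.injEq, List.cons.injEq, Prod.mk.injEq, and_true, true_and]
    omega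

-- ===== VERDICT (by name: the statement is the Claim_ definition above) =====
theorem simple_season_prediction_spec : Claim_equal_simple_season_prediction := by
  intro colors _
  show simple_season_prediction colors = simple_season_prediction_alt colors
  dsimp only [simple_season_prediction, simple_season_prediction_alt]
  rw [show (PySem.Dict.ofList [("spring", (0:Int)), ("summer", 0), ("fall", 0), ("winter", 0)])
        = PySem.Dict.mk [("spring", 0), ("summer", 0), ("fall", 0), ("winter", 0)] from rfl]
  rw [foldB_eq]
  simp only [zero_add]
  rfl
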